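-- pv_equiv track=rewrite | github.com/CHANVO04/RAG_Local_Fastest | Ingest_Local_Fastest.py | clean_scientific_text
-- ===== SOURCE A (Python) =====
-- def clean_scientific_text(text: str) -> str:
--     """
--     Cleaning rất đơn giản:
--     đánh dấu Figure / Table / Equation để downstream dễ nhận diện hơn.
--     """
--     replace_map = {
--         "Figure": "\n[FIGURE]",
--         "Fig.": "\n[FIGURE]",
--         "Table": "\n[TABLE]",
--         "Equation": "\n[EQUATION]",
--     }
--     for old, new in replace_map.items():
--         text = text.replace(old, new)
--     return text
-- ===== SOURCE B (Python) =====
-- def clean_scientific_text(text: str) -> str: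
--     """
--     Cleaning rất đơn giản:
--     đánh dấu Figure / Table / Equation để downstream dễ nhận diện hơn.
--     Single left-to-right scan: at each position, tag the first matching marker
--     (longest-first so "Figure" wins over "Fig."), otherwise copy the character.
--     """
--     items = (
--         ("Figure", "\n[FIGURE]"),
--         ("Fig.", "\n[FIGURE]"),
--         ("Table", "\n[TABLE]"),
--         ("Equation", "\n[EQUATION]"),
--     )
--     out = []
--     i, n = 0, len(text)
--     while i < n:
--         for key, tag in items:
--             if text.startswith(key, i):
--                 out.append(tag)
--                 i += len(key)
--                 break
--         else:
--             out.append(text[i])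
--             i += 1
--     return "".join(out)
-- ===== Notes on version B (the rewrite author's own statement) =====
-- stated objective: alternative
-- what changed: Replaces four sequential full-string str.replace passes by one left-to-right scan that, at each position, emits the tag of the first matching marker (longest-first) or copies the character.
import Mathlib
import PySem

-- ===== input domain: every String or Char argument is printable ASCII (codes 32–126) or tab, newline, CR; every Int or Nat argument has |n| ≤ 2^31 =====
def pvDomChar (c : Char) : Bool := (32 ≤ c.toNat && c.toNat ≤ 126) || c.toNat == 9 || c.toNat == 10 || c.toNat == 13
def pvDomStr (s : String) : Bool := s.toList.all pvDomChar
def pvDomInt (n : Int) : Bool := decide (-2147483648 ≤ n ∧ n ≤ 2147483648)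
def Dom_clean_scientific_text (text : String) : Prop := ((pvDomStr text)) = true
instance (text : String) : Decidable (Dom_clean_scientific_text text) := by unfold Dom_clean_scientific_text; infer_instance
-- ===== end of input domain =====

-- B replaces A's four sequential full-string replace passes by one left-to-right
-- scan that tags the first matching marker (longest-first) at each position
-- (objective: alternative; same return value).

-- ===== PORT A =====
def clean_scientific_text (text : String) : String :=
  let replaceMap : PySem.Dict String String :=
    PySem.Dict.ofList
      [("Figure", "\n[FIGURE]"), ("Fig.", "\n[FIGURE]"),
       ("Table", "\n[TABLE]"), ("Equation", "\n[EQUATION]")]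
  (PySem.Dict.items replaceMap).foldl (fun t p => PySem.Str.replace t p.1 p.2) text

-- ===== PORT B =====
-- Source B's while loop over positions; the inner 'for key, tag in items' with
-- text.startswith(key, i) is the if/else-if chain, in items order
def pvScan : List Char → List Char
  | [] => []
  | c :: t =>
    if ['F','i','g','u','r','e'].isPrefixOf (c :: t) then
      ['\n','[','F','I','G','U','R','E',']'] ++ pvScan (t.drop 5)
    else if ['F','i','g','.'].isPrefixOf (c :: t) then
      ['\n','[','F','I','G','U','R','E',']'] ++ pvScan (t.drop 3)
    else if ['T','a','b','l','e'].isPrefixOf (c :: t) then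
      ['\n','[','T','A','B','L','E',']'] ++ pvScan (t.drop 4)
    else if ['E','q','u','a','t','i','o','n'].isPrefixOf (c :: t) then
      ['\n','[','E','Q','U','A','T','I','O','N',']'] ++ pvScan (t.drop 7)
    else c :: pvScan t
termination_by l => l.length
decreasing_by all_goals simp

def clean_scientific_text_alt (text : String) : String :=
  String.ofList (pvScan text.toList)

-- ===== PRECONDITION & SPEC =====
def Spec_clean_scientific_text (text : String) (out : String) : Prop := out = clean_scientific_text_alt text
instance (text : String) (out : String) : Decidable (Spec_clean_scientific_text text out) := by unfold Spec_clean_scientific_text; infer_instance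

-- ===== CLAIM (what is proved, stated in full; the proofs are below) =====
def Claim_equal_clean_scientific_text : Prop := ∀ (text : String), Dom_clean_scientific_text text → Spec_clean_scientific_text text (clean_scientific_text text)

-- ===== LEMMAS AND PROOFS =====

-- one replace pass, written as the natural structural recursion on the text
def pvRep (k nl : List Char) : List Char → List Char
  | [] => []
  | c :: t =>
    if k.isPrefixOf (c :: t) then nl ++ pvRep k nl (t.drop (k.length - 1))
    else c :: pvRep k nl t
termination_by l => l.length
decreasing_by all_goals simp

lemma pvGo_eq (old new : List Char) (hold : old ≠ []) :
    ∀ (fuel : Nat) (l acc : List Char), l.length ≤ fuel →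
      PySem.Chars.replace.go old new fuel l acc = acc.reverse ++ pvRep old new l := by
  have h1 : 1 ≤ old.length := by cases old <;> simp_all
  intro fuel
  induction fuel with
  | zero =>
      intro l acc h
      have : l = [] := by cases l <;> simp_all
      subst this
      simp [PySem.Chars.replace.go, pvRep]
  | succ n ih =>
      intro l acc h
      cases l with
      | nil => simp [PySem.Chars.replace.go, pvRep]
      | cons c t =>
        by_cases hp : old.isPrefixOf (c :: t)
        · have hdrop : (c :: t).drop old.length = t.drop (old.length - 1) := by
            cases old with
            | nil => simp_all
            | cons o os => simp
          rw [PySem.Chars.replace.go]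
          simp only [hp, if_pos]
          rw [hdrop, ih _ _ (by simp at h ⊢; omega)]
          rw [pvRep]
          simp [hp]
        · rw [PySem.Chars.replace.go]
          simp only [hp]
          rw [ih t (c :: acc) (by simp at h ⊢; omega)]
          rw [pvRep]
          simp [hp]

lemma pvReplace_eq (l old new : List Char) (hold : old ≠ []) :
    PySem.Chars.replace l old new = pvRep old new l := by
  rw [PySem.Chars.replace]
  have he : old.isEmpty = false := by cases old <;> simp_all
  rw [he]
  simpa using pvGo_eq old new hold l.length l [] (le_refl _)

-- prefix transport: a '\n'-free key that prefixes the output of a pass whose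
-- replacement starts with '\n' already prefixed the input of that pass
lemma pvPrefix_back (k nl' : List Char) :
    ∀ (t ks : List Char), '\n' ∉ ks →
      ks <+: (pvRep k ('\n' :: nl') t) → ks <+: t := by
  intro t
  induction t with
  | nil => intro ks _ h; simp [pvRep] at h; simp [h]
  | cons c t ih =>
      intro ks hks h
      rw [pvRep] at h
      by_cases hp : k.isPrefixOf (c :: t)
      · simp only [hp, if_pos] at h
        cases ks with
        | nil => simp
        | cons a ks' =>
          exfalso
          rw [show ('\n' :: nl') ++ pvRep k ('\n'::nl') (t.drop (k.length-1))
                = '\n' :: (nl' ++ pvRep k ('\n'::nl') (t.drop (k.length-1))) from rfl] at h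
          rw [List.cons_prefix_cons] at h
          exact hks (by simp [h.1])
      · rw [if_neg (by simp [hp])] at h
        cases ks with
        | nil => simp
        | cons a ks' =>
          rw [List.cons_prefix_cons] at h ⊢
          exact ⟨h.1, ih ks' (by simp_all) h.2⟩

-- the four passes fused into the single scan
lemma pvMain : ∀ s : List Char,
    pvRep ['E','q','u','a','t','i','o','n'] ['\n','[','E','Q','U','A','T','I','O','N',']']
      (pvRep ['T','a','b','l','e'] ['\n','[','T','A','B','L','E',']']
        (pvRep ['F','i','g','.'] ['\n','[','F','I','G','U','R','E',']']
          (pvRep ['F','i','g','u','r','e'] ['\n','[','F','I','G','U','R','E',']'] s)))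
    = pvScan s := by
  intro s
  fun_induction pvScan s with
  | case1 => simp [pvRep]
  | case2 c t h1 ih =>
      obtain ⟨r, hr⟩ := List.isPrefixOf_iff_prefix.mp h1
      obtain ⟨hc, ht⟩ : c = 'F' ∧ t = 'i'::'g'::'u'::'r'::'e'::r := by simpa using hr.symm
      subst hc; subst ht
      simpa [pvRep] using ih
  | case3 c t h1 h2 ih =>
      obtain ⟨r, hr⟩ := List.isPrefixOf_iff_prefix.mp h2
      obtain ⟨hc, ht⟩ : c = 'F' ∧ t = 'i'::'g'::'.'::r := by simpa using hr.symm
      subst hc; subst ht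
      simpa [pvRep] using ih
  | case4 c t h1 h2 h3 ih =>
      obtain ⟨r, hr⟩ := List.isPrefixOf_iff_prefix.mp h3
      obtain ⟨hc, ht⟩ : c = 'T' ∧ t = 'a'::'b'::'l'::'e'::r := by simpa using hr.symm
      subst hc; subst ht
      simpa [pvRep] using ih
  | case5 c t h1 h2 h3 h4 ih =>
      obtain ⟨r, hr⟩ := List.isPrefixOf_iff_prefix.mp h4
      obtain ⟨hc, ht⟩ : c = 'E' ∧ t = 'q'::'u'::'a'::'t'::'i'::'o'::'n'::r := by simpa using hr.symm
      subst hc; subst ht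
      simpa [pvRep] using ih
  | case6 c t h1 h2 h3 h4 ih =>
      have e1 : pvRep ['F','i','g','u','r','e'] ['\n','[','F','I','G','U','R','E',']'] (c::t)
          = c :: pvRep ['F','i','g','u','r','e'] ['\n','[','F','I','G','U','R','E',']'] t := by
        rw [pvRep]; simp [h1]
      have n2 : ¬ (['F','i','g','.'].isPrefixOf
          (c :: pvRep ['F','i','g','u','r','e'] ['\n','[','F','I','G','U','R','E',']'] t) = true) := by
        intro hx
        obtain ⟨hcF, h'⟩ := List.cons_prefix_cons.mp (List.isPrefixOf_iff_prefix.mp hx)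
        have hb := pvPrefix_back _ _ t ['i','g','.'] (by decide) h'
        exact h2 (List.isPrefixOf_iff_prefix.mpr (List.cons_prefix_cons.mpr ⟨hcF, hb⟩))
      have e2 : pvRep ['F','i','g','.'] ['\n','[','F','I','G','U','R','E',']']
            (c :: pvRep ['F','i','g','u','r','e'] ['\n','[','F','I','G','U','R','E',']'] t)
          = c :: pvRep ['F','i','g','.'] ['\n','[','F','I','G','U','R','E',']']
              (pvRep ['F','i','g','u','r','e'] ['\n','[','F','I','G','U','R','E',']'] t) := by
        rw [pvRep]; simp [n2]
      have n3 : ¬ (['T','a','b','l','e'].isPrefixOf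
          (c :: pvRep ['F','i','g','.'] ['\n','[','F','I','G','U','R','E',']']
                 (pvRep ['F','i','g','u','r','e'] ['\n','[','F','I','G','U','R','E',']'] t)) = true) := by
        intro hx
        obtain ⟨hcT, h'⟩ := List.cons_prefix_cons.mp (List.isPrefixOf_iff_prefix.mp hx)
        have hb := pvPrefix_back _ _ _ ['a','b','l','e'] (by decide) h'
        have hb2 := pvPrefix_back _ _ t ['a','b','l','e'] (by decide) hb
        exact h3 (List.isPrefixOf_iff_prefix.mpr (List.cons_prefix_cons.mpr ⟨hcT, hb2⟩))
      have e3 : pvRep ['T','a','b','l','e'] ['\n','[','T','A','B','L','E',']']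
            (c :: pvRep ['F','i','g','.'] ['\n','[','F','I','G','U','R','E',']']
                   (pvRep ['F','i','g','u','r','e'] ['\n','[','F','I','G','U','R','E',']'] t))
          = c :: pvRep ['T','a','b','l','e'] ['\n','[','T','A','B','L','E',']']
              (pvRep ['F','i','g','.'] ['\n','[','F','I','G','U','R','E',']']
                (pvRep ['F','i','g','u','r','e'] ['\n','[','F','I','G','U','R','E',']'] t)) := by
        rw [pvRep]; simp [n3]
      have n4 : ¬ (['E','q','u','a','t','i','o','n'].isPrefixOf
          (c :: pvRep ['T','a','b','l','e'] ['\n','[','T','A','B','L','E',']']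
                 (pvRep ['F','i','g','.'] ['\n','[','F','I','G','U','R','E',']']
                   (pvRep ['F','i','g','u','r','e'] ['\n','[','F','I','G','U','R','E',']'] t))) = true) := by
        intro hx
        obtain ⟨hcE, h'⟩ := List.cons_prefix_cons.mp (List.isPrefixOf_iff_prefix.mp hx)
        have hb := pvPrefix_back _ _ _ ['q','u','a','t','i','o','n'] (by decide) h'
        have hb2 := pvPrefix_back _ _ _ ['q','u','a','t','i','o','n'] (by decide) hb
        have hb3 := pvPrefix_back _ _ t ['q','u','a','t','i','o','n'] (by decide) hb2
        exact h4 (List.isPrefixOf_iff_prefix.mpr (List.cons_prefix_cons.mpr ⟨hcE, hb3⟩))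
      have e4 : pvRep ['E','q','u','a','t','i','o','n'] ['\n','[','E','Q','U','A','T','I','O','N',']']
            (c :: pvRep ['T','a','b','l','e'] ['\n','[','T','A','B','L','E',']']
                   (pvRep ['F','i','g','.'] ['\n','[','F','I','G','U','R','E',']']
                     (pvRep ['F','i','g','u','r','e'] ['\n','[','F','I','G','U','R','E',']'] t)))
          = c :: pvRep ['E','q','u','a','t','i','o','n'] ['\n','[','E','Q','U','A','T','I','O','N',']']
              (pvRep ['T','a','b','l','e'] ['\n','[','T','A','B','L','E',']']
                (pvRep ['F','i','g','.'] ['\n','[','F','I','G','U','R','E',']']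
                  (pvRep ['F','i','g','u','r','e'] ['\n','[','F','I','G','U','R','E',']'] t))) := by
        rw [pvRep]; simp [n4]
      rw [e1, e2, e3, e4, ih]

-- ===== VERDICT (by name: the statement is the Claim_ definition above) =====
theorem clean_scientific_text_spec : Claim_equal_clean_scientific_text := by
  intro text _
  unfold Spec_clean_scientific_text clean_scientific_text_alt
  have hA : clean_scientific_text text
      = PySem.Str.replace (PySem.Str.replace (PySem.Str.replace
          (PySem.Str.replace text "Figure" "\n[FIGURE]") "Fig." "\n[FIGURE]")
          "Table" "\n[TABLE]") "Equation" "\n[EQUATION]" := rfl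
  rw [hA]
  simp only [PySem.Str.replace, String.toList_ofList]
  rw [pvReplace_eq _ _ _ (by decide), pvReplace_eq _ _ _ (by decide),
      pvReplace_eq _ _ _ (by decide), pvReplace_eq _ _ _ (by decide)]
  have hF : "Figure".toList = ['F','i','g','u','r','e'] := by decide
  have hFd : "Fig.".toList = ['F','i','g','.'] := by decide
  have hT : "Table".toList = ['T','a','b','l','e'] := by decide
  have hE : "Equation".toList = ['E','q','u','a','t','i','o','n'] := by decide
  have hnF : "\n[FIGURE]".toList = ['\n','[','F','I','G','U','R','E',']'] := by decide
  have hnT : "\n[TABLE]".toList = ['\n','[','T','A','B','L','E',']'] := by decide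
  have hnE : "\n[EQUATION]".toList = ['\n','[','E','Q','U','A','T','I','O','N',']'] := by decide
  rw [hF, hFd, hT, hE, hnF, hnT, hnE, pvMain]
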